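-- pv_equiv track=rewrite | github.com/nmc-costa/neuroprime | neuroprime/src/utils/data_analysis/e2_pipe/eeg/offline/extract_pipe_v1/e2_4_group_feat_df_v6.py | count_cross_group_subjects
-- ===== SOURCE A (Python) =====
-- def count_cross_group_subjects(A, B):
--     counter=0
--     subjects=[]
--     for a in A:
--         for b in B:
--             if a[0]==b[0]:
--                 counter+=1
--                 subjects.append(a[0])
--     return counter, subjects
-- ===== SOURCE B (Python) =====
-- def count_cross_group_subjects(A, B):
--     cnt = {}
--     for b in B:
--         cnt[b[0]] = cnt.get(b[0], 0) + 1
--     counter = 0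
--     subjects = []
--     for a in A:
--         c = cnt.get(a[0], 0)
--         counter += c
--         subjects.extend([a[0]] * c)
--     return counter, subjects
-- ===== Notes on version B (the rewrite author's own statement) =====
-- stated objective: faster
-- what changed: replaces the nested scan over B for every a with a hash count of B's first elements built once, then one pass over A adding the count and extending with replicated a[0]
-- outside the precondition, e.g. on count_cross_group_subjects([], [[]]): A returns (0, []), B raises IndexError
import Mathlib
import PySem

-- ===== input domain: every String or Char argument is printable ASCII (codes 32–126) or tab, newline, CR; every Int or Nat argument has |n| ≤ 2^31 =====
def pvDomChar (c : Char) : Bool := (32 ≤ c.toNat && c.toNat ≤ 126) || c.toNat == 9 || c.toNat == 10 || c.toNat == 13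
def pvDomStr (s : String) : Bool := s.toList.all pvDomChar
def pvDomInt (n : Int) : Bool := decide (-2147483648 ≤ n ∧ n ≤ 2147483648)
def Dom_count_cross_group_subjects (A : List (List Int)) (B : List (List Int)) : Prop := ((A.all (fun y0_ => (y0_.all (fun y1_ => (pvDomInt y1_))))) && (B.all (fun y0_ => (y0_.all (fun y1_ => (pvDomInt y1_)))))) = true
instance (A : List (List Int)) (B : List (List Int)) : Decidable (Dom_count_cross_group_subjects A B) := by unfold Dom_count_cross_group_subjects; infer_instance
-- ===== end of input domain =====

-- B replaces A's nested scan over B with a counter of B's first elements built once (O(|A|+|B|) vs O(|A|*|B|)).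

-- ===== PORT A =====
def count_cross_group_subjects (A : List (List Int)) (B : List (List Int)) : Int × List Int :=
  A.foldl (fun st a =>
    B.foldl (fun st b =>
      if PySem.List.pyGetD a 0 0 = PySem.List.pyGetD b 0 0 then
        (st.1 + 1, st.2 ++ [PySem.List.pyGetD a 0 0])
      else st) st) (0, [])

-- ===== PORT B =====
def count_cross_group_subjects_alt (A : List (List Int)) (B : List (List Int)) : Int × List Int :=
  let cnt := B.foldl (fun d b => d.insert (PySem.List.pyGetD b 0 0) (d.getD (PySem.List.pyGetD b 0 0) 0 + 1)) PySem.Dict.empty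
  A.foldl (fun st a =>
    let c := cnt.getD (PySem.List.pyGetD a 0 0) 0
    (st.1 + c, st.2 ++ List.replicate c.toNat (PySem.List.pyGetD a 0 0))) (0, [])

-- ===== PRECONDITION & SPEC =====
-- Pre_ excludes inputs with an empty inner list, on which A raises IndexError — except that when A = []
-- A accidentally returns (0, []) without touching B's (possibly empty) rows; B's precomputation over B
-- raises IndexError there, so those inputs are excluded too.
def Pre_count_cross_group_subjects (A : List (List Int)) (B : List (List Int)) : Prop :=
  (∀ a ∈ A, a ≠ []) ∧ (∀ b ∈ B, b ≠ [])
instance (A : List (List Int)) (B : List (List Int)) : Decidable (Pre_count_cross_group_subjects A B) := by unfold Pre_count_cross_group_subjects; infer_instance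
def pvWitness_count_cross_group_subjects : List (List Int) × List (List Int) := ([[1, 2], [3]], [[1], [3, 4], [1, 5]])
def Spec_count_cross_group_subjects (A : List (List Int)) (B : List (List Int)) (out : Int × List Int) : Prop := out = count_cross_group_subjects_alt A B
instance (A : List (List Int)) (B : List (List Int)) (out : Int × List Int) : Decidable (Spec_count_cross_group_subjects A B out) := by unfold Spec_count_cross_group_subjects; infer_instance

-- ===== CLAIM (what is proved, stated in full; the proofs are below) =====
def Claim_equal_count_cross_group_subjects : Prop := ∀ (A : List (List Int)) (B : List (List Int)), Dom_count_cross_group_subjects A B → Pre_count_cross_group_subjects A B → Spec_count_cross_group_subjects A B (count_cross_group_subjects A B)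

-- ===== LEMMAS AND PROOFS =====

-- A's inner loop over B, for a fixed first element x, adds the multiplicity of x among B's heads.
theorem pv_inner_loop (B : List (List Int)) (x : Int) (st : Int × List Int) :
    B.foldl (fun st b => if x = PySem.List.pyGetD b 0 0 then (st.1 + 1, st.2 ++ [x]) else st) st
      = (st.1 + ((B.map (fun b => PySem.List.pyGetD b 0 0)).count x : Int),
         st.2 ++ List.replicate ((B.map (fun b => PySem.List.pyGetD b 0 0)).count x) x) := by
  induction B generalizing st with
  | nil => simp
  | cons b B ih =>
    simp only [List.foldl_cons, List.map_cons, List.count_cons]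
    by_cases h : x = PySem.List.pyGetD b 0 0
    · rw [if_pos h, ih]
      have hb : (PySem.List.pyGetD b 0 0 == x) = true := beq_iff_eq.mpr h.symm
      simp only [hb, if_true, Prod.mk.injEq]
      constructor
      · push_cast; ring
      · simp [List.replicate_succ, List.append_assoc]
    · rw [if_neg h, ih]
      have hb : (PySem.List.pyGetD b 0 0 == x) = false := by
        simp only [beq_eq_false_iff_ne, ne_eq]; exact fun e => h e.symm
      simp [hb]

-- B's counter looks up exactly that multiplicity.
theorem pv_counter_getD (B : List (List Int)) (x : Int) :
    (B.foldl (fun d b => d.insert (PySem.List.pyGetD b 0 0) (d.getD (PySem.List.pyGetD b 0 0) 0 + 1)) PySem.Dict.empty).getD x 0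
      = ((B.map (fun b => PySem.List.pyGetD b 0 0)).count x : Int) := by
  rw [← List.foldl_map (f := fun b => PySem.List.pyGetD b 0 0)
        (g := fun (d : PySem.Dict Int Int) k => d.insert k (d.getD k 0 + 1))]
  rw [PySem.Dict.getD_foldl_insert_add_one]
  simp

-- ===== VERDICT (by name: the statement is the Claim_ definition above) =====
theorem count_cross_group_subjects_spec : Claim_equal_count_cross_group_subjects := by
  intro A B _ _
  unfold Spec_count_cross_group_subjects count_cross_group_subjects count_cross_group_subjects_alt
  refine PySem.List.foldl_congr_mem A _ _ _ (fun st a _ => ?_)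
  rw [pv_inner_loop, pv_counter_getD]
  simp
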